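-- pv_equiv track=rewrite | github.com/BOBAvov/lab_proga | lab_9/check.py | string_is_float_list
-- ===== SOURCE A (Python) =====
-- def is_integer_string(s: str) -> bool:
--     if not s:
--         return False
--     start_index = 0
--     if s.startswith("-"):
--         if len(s) == 1:
--             return False
--         start_index = 1
--     if start_index >= len(s):
--         return False
--     for i in range(start_index, len(s)):
--         if s[i] not in "0123456789":
--             return False
--     return True
--
-- def is_float_string(s: str) -> bool:
--     if not s:
--         return False
--
--     # Проверяем e в строке
--     if 'e' in s.lower():
--         parts = s.lower().split('e')
--         if len(parts) != 2:
--             return False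
--
--         # Проверяем мантиссу (часть до 'e')
--         mantissa = parts[0]
--         if not mantissa:
--             return False
--
--         # Проверяем экспоненту (часть после 'e')
--         exponent = parts[1]
--         if not exponent:
--             return False
--
--         # Мантисса должна быть валидным float числом
--         if not is_float_string(mantissa):
--             return False
--
--         # Экспонента должна быть валидным целым числом
--         if not is_integer_string(exponent):
--             return False
--
--         return True
--
--     start_index = 0
--     if s[0] in "+-":
--         if len(s) == 1:
--             return False
--         start_index = 1
--
--     if start_index >= len(s):
--         return False
--
--     dot_found = False
--     digit_found = False
--
--     # Проверяем оставшуюся часть строки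
--     for i in range(start_index, len(s)):
--         char = s[i]
--
--         if char == '.':
--             if dot_found:
--                 return False
--             dot_found = True
--         elif char in "0123456789":
--             digit_found = True
--         else:
--             return False
--
--     # Строка должна содержать хотя бы одну цифру (чтобы отсечь случаи "." или "-.")
--     if not digit_found:
--         return False
--
--     return True
--
-- def string_is_float_list(s: str, n: int) -> bool:
--     parts = s.split()
--     if len(parts) != n:
--         return False
--     for part in parts:
--         if not is_float_string(part):
--             return False
--     return True
-- ===== SOURCE B (Python) =====
-- # B: single-pass DFA per token instead of A's lower/split/recursive checks.
--
-- # states: 0 start, 1 after sign, 2 int digits, 3 digits after dot,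
-- # 4 dot with no digit yet, 5 after e, 6 after e-, 7 exponent digits, 8 dead
-- def _step(st, c):
--     d = '0' <= c <= '9'
--     if st == 0:
--         return 1 if c in '+-' else 2 if d else 4 if c == '.' else 8
--     if st == 1:
--         return 2 if d else 4 if c == '.' else 8
--     if st == 2:
--         return 2 if d else 3 if c == '.' else 5 if c in 'eE' else 8
--     if st == 3:
--         return 3 if d else 5 if c in 'eE' else 8
--     if st == 4:
--         return 3 if d else 8
--     if st == 5:
--         return 6 if c == '-' else 7 if d else 8
--     if st == 6 or st == 7:
--         return 7 if d else 8
--     return 8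
--
-- def _ok(t):
--     st = 0
--     for c in t:
--         st = _step(st, c)
--     return st in (2, 3, 7)
--
-- def string_is_float_list(s: str, n: int) -> bool:
--     parts = s.split()
--     if n != len(parts):
--         return False
--     return all(_ok(t) for t in parts)
-- ===== Notes on version B (the rewrite author's own statement) =====
-- stated objective: alternative
-- what changed: Each token is validated in one left-to-right pass of an explicit 9-state DFA instead of A's lowercase-then-split-on-'e', recursive mantissa check and separate character loops with dot/digit flags.
import Mathlib
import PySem

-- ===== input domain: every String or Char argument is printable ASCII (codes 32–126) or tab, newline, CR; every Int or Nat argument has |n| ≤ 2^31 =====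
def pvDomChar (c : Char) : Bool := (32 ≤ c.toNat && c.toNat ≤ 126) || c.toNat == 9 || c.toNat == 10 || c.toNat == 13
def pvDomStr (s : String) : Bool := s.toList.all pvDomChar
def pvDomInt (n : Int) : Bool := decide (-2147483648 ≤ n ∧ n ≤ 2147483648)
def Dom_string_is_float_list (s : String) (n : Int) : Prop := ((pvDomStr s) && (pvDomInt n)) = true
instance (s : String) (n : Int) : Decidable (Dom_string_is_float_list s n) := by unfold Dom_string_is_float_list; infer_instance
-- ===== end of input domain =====

-- B replaces A's lower/split('e')/recursive validation of each token by a single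
-- left-to-right pass of an explicit finite state machine (objective: alternative).

-- ===== PORT A =====
-- helpers work on List Char (the characters of the Python str)

-- the 'for i in range(start_index, len(s))' loop of is_integer_string
def allDigitsA : List Char → Bool
  | [] => true
  | c :: r => if (['0','1','2','3','4','5','6','7','8','9'].contains c) then allDigitsA r else false

-- is_integer_string
def isIntA : List Char → Bool
  | [] => false
  | c :: rest =>
      if c = '-' then (if rest = [] then false else allDigitsA rest)
      else allDigitsA (c :: rest)

-- the dot/digit loop of is_float_string
def floatLoopA : Bool → Bool → List Char → Bool
  | _, digf, [] => digf
  | dotf, digf, c :: r =>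
      if c = '.' then (if dotf then false else floatLoopA true digf r)
      else if (['0','1','2','3','4','5','6','7','8','9'].contains c) then floatLoopA dotf true r
      else false

-- is_float_string, with a fuel guard for its recursive mantissa call (guard only: the
-- top-level call passes length+1 fuel, which is never exhausted)
def isFloatA : Nat → List Char → Bool
  | 0, _ => false
  | fuel + 1, l =>
    if l = [] then false
    else if PySem.Chars.isIn ['e'] (PySem.Chars.lower l) then
      match PySem.Chars.splitOn (PySem.Chars.lower l) ['e'] with
      | [mantissa, exponent] =>
          if mantissa = [] then false
          else if exponent = [] then false
          else if !isFloatA fuel mantissa then false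
          else if !isIntA exponent then false
          else true
      | _ => false
    else
      match l with
      | [] => false
      | c :: rest =>
          if (['+','-'].contains c) then
            (if rest = [] then false else floatLoopA false false rest)
          else floatLoopA false false (c :: rest)

-- the 'for part in parts' loop of string_is_float_list
def partsLoopA : List String → Bool
  | [] => true
  | p :: r => if !isFloatA (p.toList.length + 1) p.toList then false else partsLoopA r

def string_is_float_list (s : String) (n : Int) : Bool :=
  let parts := PySem.Str.split₀ s
  if (parts.length : Int) ≠ n then false
  else partsLoopA parts

-- ===== PORT B =====
-- states: 0 start, 1 after sign, 2 int digits, 3 digits after dot, 4 dot w/o digit,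
-- 5 after e, 6 after e-, 7 exponent digits, 8 dead
def stepB (st : Nat) (c : Char) : Nat :=
  if st = 0 then (if c = '+' ∨ c = '-' then 1 else if PySem.Chars.isdigit c then 2 else if c = '.' then 4 else 8)
  else if st = 1 then (if PySem.Chars.isdigit c then 2 else if c = '.' then 4 else 8)
  else if st = 2 then (if PySem.Chars.isdigit c then 2 else if c = '.' then 3 else if c = 'e' ∨ c = 'E' then 5 else 8)
  else if st = 3 then (if PySem.Chars.isdigit c then 3 else if c = 'e' ∨ c = 'E' then 5 else 8)
  else if st = 4 then (if PySem.Chars.isdigit c then 3 else 8)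
  else if st = 5 then (if c = '-' then 6 else if PySem.Chars.isdigit c then 7 else 8)
  else if st = 6 ∨ st = 7 then (if PySem.Chars.isdigit c then 7 else 8)
  else 8

def okB (t : List Char) : Bool :=
  let f := t.foldl stepB 0
  f = 2 || f = 3 || f = 7

def string_is_float_list_alt (s : String) (n : Int) : Bool :=
  let parts := PySem.Str.split₀ s
  if n ≠ (parts.length : Int) then false
  else parts.all (fun p => okB p.toList)

-- ===== PRECONDITION & SPEC =====
def Spec_string_is_float_list (s : String) (n : Int) (out : Bool) : Prop := out = string_is_float_list_alt s n
instance (s : String) (n : Int) (out : Bool) : Decidable (Spec_string_is_float_list s n out) := by unfold Spec_string_is_float_list; infer_instance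

-- ===== CLAIM (what is proved, stated in full; the proofs are below) =====
def Claim_equal_string_is_float_list : Prop := ∀ (s : String) (n : Int), Dom_string_is_float_list s n → Spec_string_is_float_list s n (string_is_float_list s n)

-- ===== LEMMAS AND PROOFS =====

-- ---- small Char facts ----
theorem tn_plus : ('+').toNat = 43 := rfl
theorem tn_minus : ('-').toNat = 45 := rfl
theorem tn_dot : ('.').toNat = 46 := rfl
theorem tn_e : ('e').toNat = 101 := rfl
theorem tn_E : ('E').toNat = 69 := rfl
theorem tn_d0 : ('0').toNat = 48 := rfl
theorem tn_d1 : ('1').toNat = 49 := rfl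
theorem tn_d2 : ('2').toNat = 50 := rfl
theorem tn_d3 : ('3').toNat = 51 := rfl
theorem tn_d4 : ('4').toNat = 52 := rfl
theorem tn_d5 : ('5').toNat = 53 := rfl
theorem tn_d6 : ('6').toNat = 54 := rfl
theorem tn_d7 : ('7').toNat = 55 := rfl
theorem tn_d8 : ('8').toNat = 56 := rfl
theorem tn_d9 : ('9').toNat = 57 := rfl

theorem char_eq_of_toNat {c d : Char} (h : c.toNat = d.toNat) : c = d := by
  rw [← Char.ofNat_toNat c, h, Char.ofNat_toNat]

theorem upper_bounds (c : Char) (h : PySem.Chars.isupper c = true) : 65 ≤ c.toNat ∧ c.toNat ≤ 90 := by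
  simp only [PySem.Chars.isupper, Bool.and_eq_true, decide_eq_true_eq, Char.le_def] at h
  exact ⟨UInt32.le_iff_toNat_le.mp h.1, UInt32.le_iff_toNat_le.mp h.2⟩

theorem toNat_lower_of_upper (c : Char) (h : PySem.Chars.isupper c = true) :
    (PySem.Chars.lowerChar c).toNat = c.toNat + 32 := by
  have hb := upper_bounds c h
  simp only [PySem.Chars.lowerChar, h, if_true]
  rw [Char.toNat_ofNat, if_pos (Or.inl (by omega))]

theorem isdigit_toNat (c : Char) : PySem.Chars.isdigit c = true ↔ 48 ≤ c.toNat ∧ c.toNat ≤ 57 := by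
  simp only [PySem.Chars.isdigit, Bool.and_eq_true, decide_eq_true_eq, Char.le_def]
  constructor
  · rintro ⟨h1, h2⟩; exact ⟨UInt32.le_iff_toNat_le.mp h1, UInt32.le_iff_toNat_le.mp h2⟩
  · rintro ⟨h1, h2⟩; exact ⟨UInt32.le_iff_toNat_le.mpr h1, UInt32.le_iff_toNat_le.mpr h2⟩

theorem eq_char_toNat (c d : Char) : c = d ↔ c.toNat = d.toNat :=
  ⟨fun h => h ▸ rfl, char_eq_of_toNat⟩

-- digit-membership test of A = isdigit test of B
theorem digits_contains (c : Char) :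
    (['0','1','2','3','4','5','6','7','8','9'].contains c) = PySem.Chars.isdigit c := by
  by_cases h : PySem.Chars.isdigit c = true
  · rw [h]
    have := (isdigit_toNat c).mp h
    simp only [List.contains_eq_mem, decide_eq_true_eq, List.mem_cons, List.mem_singleton]
    have h48 : c.toNat = 48 ∨ c.toNat = 49 ∨ c.toNat = 50 ∨ c.toNat = 51 ∨ c.toNat = 52 ∨
        c.toNat = 53 ∨ c.toNat = 54 ∨ c.toNat = 55 ∨ c.toNat = 56 ∨ c.toNat = 57 := by omega
    simp only [eq_char_toNat, tn_plus, tn_minus, tn_dot, tn_e, tn_E, tn_d0, tn_d1, tn_d2, tn_d3, tn_d4, tn_d5, tn_d6, tn_d7, tn_d8, tn_d9]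
    exact Or.imp_right (fun h => h.imp_right (fun h => h.imp_right (fun h => h.imp_right (fun h => h.imp_right (fun h => h.imp_right (fun h => h.imp_right (fun h => h.imp_right (fun h => h.imp_right Or.inl))))))))  h48
  · rw [Bool.not_eq_true] at h
    rw [h]
    simp only [List.contains_eq_mem, decide_eq_false_iff_not, List.mem_cons, List.mem_singleton]
    rintro (rfl|rfl|rfl|rfl|rfl|rfl|rfl|rfl|rfl|rfl|h2) <;> first | (revert h; decide) | (exact absurd h2 (List.not_mem_nil))

-- ---- lowering is invisible to the DFA ----
theorem stepB_lower (st : Nat) (c : Char) : stepB st (PySem.Chars.lowerChar c) = stepB st c := by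
  by_cases hu : PySem.Chars.isupper c = true
  · have hb := upper_bounds c hu
    have hln := toNat_lower_of_upper c hu
    have nd : PySem.Chars.isdigit (PySem.Chars.lowerChar c) = false := by
      rw [← Bool.not_eq_true, isdigit_toNat]; omega
    have nd' : PySem.Chars.isdigit c = false := by
      rw [← Bool.not_eq_true, isdigit_toNat]; omega
    have l1 : (PySem.Chars.lowerChar c = '+') = False := by
      simp only [eq_char_toNat, tn_plus, eq_iff_iff, iff_false]; omega
    have l2 : (PySem.Chars.lowerChar c = '-') = False := by
      simp only [eq_char_toNat, tn_minus, eq_iff_iff, iff_false]; omega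
    have l3 : (PySem.Chars.lowerChar c = '.') = False := by
      simp only [eq_char_toNat, tn_dot, eq_iff_iff, iff_false]; omega
    have l5 : (PySem.Chars.lowerChar c = 'E') = False := by
      simp only [eq_char_toNat, tn_E, eq_iff_iff, iff_false]; omega
    have r1 : (c = '+') = False := by
      simp only [eq_char_toNat, tn_plus, eq_iff_iff, iff_false]; omega
    have r2 : (c = '-') = False := by
      simp only [eq_char_toNat, tn_minus, eq_iff_iff, iff_false]; omega
    have r3 : (c = '.') = False := by
      simp only [eq_char_toNat, tn_dot, eq_iff_iff, iff_false]; omega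
    have r4 : (c = 'e') = False := by
      simp only [eq_char_toNat, tn_e, eq_iff_iff, iff_false]; omega
    by_cases hE : c = 'E'
    · have hc69 : c.toNat = 69 := by rw [hE, tn_E]
      have l4 : (PySem.Chars.lowerChar c = 'e') = True := by
        simp only [eq_char_toNat, tn_e, eq_iff_iff, iff_true]; omega
      have r5 : (c = 'E') = True := by simp [hE]
      simp only [stepB, nd, nd', l1, l2, l3, l4, l5, r1, r2, r3, r4, r5, or_false, false_or,
        or_true, true_or, if_false, if_true, Bool.false_eq_true]
    · have l4 : (PySem.Chars.lowerChar c = 'e') = False := by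
        simp only [eq_char_toNat, tn_e, eq_iff_iff, iff_false]
        intro hh
        exact hE (char_eq_of_toNat (by rw [tn_E]; omega))
      have r5 : (c = 'E') = False := by simp [hE]
      simp only [stepB, nd, nd', l1, l2, l3, l4, l5, r1, r2, r3, r4, r5, or_false, false_or,
        if_false, Bool.false_eq_true]
  · rw [Bool.not_eq_true] at hu
    simp only [PySem.Chars.lowerChar, hu, Bool.false_eq_true, if_false]

theorem foldl_lower (l : List Char) (st : Nat) :
    (PySem.Chars.lower l).foldl stepB st = l.foldl stepB st := by
  induction l generalizing st with
  | nil => rfl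
  | cons c r ih =>
      show ((PySem.Chars.lowerChar c :: PySem.Chars.lower r).foldl stepB st) = _
      simp only [List.foldl_cons, stepB_lower]
      exact ih _

theorem digit_ne (c : Char) (h : PySem.Chars.isdigit c = true) :
    c ≠ '+' ∧ c ≠ '-' ∧ c ≠ '.' ∧ c ≠ 'e' ∧ c ≠ 'E' := by
  refine ⟨?_, ?_, ?_, ?_, ?_⟩ <;> (intro hh; subst hh; revert h; decide)

theorem foldl8 (l : List Char) : l.foldl stepB 8 = 8 := by
  induction l with
  | nil => rfl
  | cons c r ih => simpa [stepB] using ih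

-- A's dot/digit loop as a state function (proof device)
def aRun : Bool → Bool → List Char → Option (Bool × Bool)
  | d, g, [] => some (d, g)
  | d, g, c :: r =>
      if c = '.' then (if d then none else aRun true g r)
      else if PySem.Chars.isdigit c then aRun d true r
      else none

theorem floatLoop_aRun (d g : Bool) (l : List Char) :
    floatLoopA d g l = (match aRun d g l with | none => false | some (_, g') => g') := by
  induction l generalizing d g with
  | nil => rfl
  | cons c r ih =>
      simp only [floatLoopA, aRun, digits_contains]
      by_cases hc : c = '.'
      · subst hc; by_cases hd : d <;> simp [hd, ih]
      · by_cases hdig : PySem.Chars.isdigit c <;> simp [hc, hdig, ih]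

def stQ (d g : Bool) : Nat := if d then (if g then 3 else 4) else (if g then 2 else 1)

theorem run_corr (l : List Char) (he : 'e' ∉ l) (hE : 'E' ∉ l) (d g : Bool) :
    l.foldl stepB (stQ d g) =
      (match aRun d g l with | none => 8 | some (d', g') => stQ d' g') := by
  induction l generalizing d g with
  | nil => rfl
  | cons c r ih =>
      have he' : 'e' ∉ r := fun h => he (List.mem_cons_of_mem _ h)
      have hE' : 'E' ∉ r := fun h => hE (List.mem_cons_of_mem _ h)
      have hce : c ≠ 'e' := fun h => he (h ▸ List.mem_cons_self)
      have hcE : c ≠ 'E' := fun h => hE (h ▸ List.mem_cons_self)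
      simp only [List.foldl_cons, aRun]
      by_cases hc : c = '.'
      · subst hc
        have hstep : stepB (stQ d g) '.' = if d then 8 else stQ true g := by
          cases d <;> cases g <;> decide
        rw [hstep]
        by_cases hd : d
        · simp [hd, foldl8]
        · simp only [hd, if_false, Bool.false_eq_true]
          exact ih he' hE' true g
      · by_cases hdig : PySem.Chars.isdigit c = true
        · have hne := digit_ne c hdig
          have hstep : stepB (stQ d g) c = stQ d true := by
            cases d <;> cases g <;>
              simp [stepB, stQ, hdig, hne.1, hne.2.1, hne.2.2.1, hne.2.2.2.1, hne.2.2.2.2]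
          rw [hstep]
          simp only [hc, hdig, if_true, if_false]
          exact ih he' hE' d true
        · have hstep : stepB (stQ d g) c = 8 := by
            cases d <;> cases g <;>
              simp [stepB, stQ, hdig, hc, hce, hcE]
          rw [hstep]
          simp [hdig, hc, foldl8]

-- the no-'e' branch of is_float_string
def aNoE : List Char → Bool
  | [] => false
  | c :: rest =>
      if (['+','-'].contains c) then
        (if rest = [] then false else floatLoopA false false rest)
      else floatLoopA false false (c :: rest)

theorem run_case (l : List Char) (he : 'e' ∉ l) (hE : 'E' ∉ l) :
    ((l.foldl stepB (stQ false false) = 2 ∨ l.foldl stepB (stQ false false) = 3) ↔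
        floatLoopA false false l = true) ∧
      l.foldl stepB (stQ false false) ∈ ([0, 1, 4, 8, 2, 3] : List Nat) := by
  rw [run_corr l he hE false false, floatLoop_aRun]
  cases h : aRun false false l with
  | none => simp
  | some p =>
      obtain ⟨d', g'⟩ := p
      cases d' <;> cases g' <;> simp [stQ]

theorem mant_corr (l : List Char) (he : 'e' ∉ l) (hE : 'E' ∉ l) :
    ((l.foldl stepB 0 = 2 ∨ l.foldl stepB 0 = 3) ↔ aNoE l = true) ∧
      l.foldl stepB 0 ∈ ([0, 1, 4, 8, 2, 3] : List Nat) := by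
  cases l with
  | nil => simp [aNoE]
  | cons c rest =>
      have he' : 'e' ∉ rest := fun h => he (List.mem_cons_of_mem _ h)
      have hE' : 'E' ∉ rest := fun h => hE (List.mem_cons_of_mem _ h)
      by_cases hsign : (['+','-'].contains c) = true
      · have hc : c = '+' ∨ c = '-' := by simpa using hsign
        have hstep : stepB 0 c = 1 := by rcases hc with rfl | rfl <;> decide
        rw [List.foldl_cons, hstep]
        cases rest with
        | nil => rcases hc with rfl | rfl <;> decide
        | cons c2 r2 =>
            have hrc := run_case (c2 :: r2) he' hE'
            simpa [aNoE, stQ, hc, show ¬(c2 :: r2 = []) from by simp] using hrc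
      · have hc : ¬(c = '+' ∨ c = '-') := by simpa using hsign
        have hstep : stepB 0 c = stepB 1 c := by simp [stepB, hc]
        have h01 : (c :: rest).foldl stepB 0 = (c :: rest).foldl stepB (stQ false false) := by
          simp only [List.foldl_cons, hstep]; rfl
        rw [h01]
        have := run_case (c :: rest) he hE
        simpa [aNoE, hc] using this

theorem allDigits_cons (c : Char) (r : List Char) :
    allDigitsA (c :: r) = if PySem.Chars.isdigit c then allDigitsA r else false := by
  simp only [allDigitsA, digits_contains]

theorem seven67 (w : List Char) (st : Nat) (h : st = 6 ∨ st = 7) :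
    w.foldl stepB st = if w = [] then st else if allDigitsA w then 7 else 8 := by
  induction w generalizing st with
  | nil => simp
  | cons c r ih =>
      simp only [List.foldl_cons]
      by_cases hdig : PySem.Chars.isdigit c = true
      · have hstep : stepB st c = 7 := by rcases h with rfl | rfl <;> simp [stepB, hdig]
        rw [hstep, ih 7 (Or.inr rfl)]
        rw [allDigits_cons, hdig]
        by_cases hr : r = []
        · subst hr; simp [allDigitsA]
        · simp [hr]
      · have hstep : stepB st c = 8 := by rcases h with rfl | rfl <;> simp [stepB, hdig]
        rw [hstep, foldl8, allDigits_cons]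
        simp [hdig]

theorem exp_corr (v : List Char) :
    (decide (v.foldl stepB 5 = 2) || decide (v.foldl stepB 5 = 3) || decide (v.foldl stepB 5 = 7))
      = isIntA v := by
  cases v with
  | nil => decide
  | cons c r =>
      rw [List.foldl_cons]
      by_cases hdash : c = '-'
      · subst hdash
        rw [show stepB 5 '-' = 6 from by decide, seven67 r 6 (Or.inl rfl)]
        simp only [isIntA, if_pos rfl]
        cases r with
        | nil => decide
        | cons c2 r2 =>
            simp only [show ¬(c2 :: r2 = []) from by simp, if_false]
            by_cases hd : allDigitsA (c2 :: r2) = true <;> simp [hd]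
      · by_cases hdig : PySem.Chars.isdigit c = true
        · have hne := digit_ne c hdig
          rw [show stepB 5 c = 7 from by simp [stepB, hne.2.1, hdig], seven67 r 7 (Or.inr rfl)]
          simp only [isIntA, hdash, if_false, allDigits_cons, hdig, if_true]
          by_cases hr : r = []
          · subst hr; simp [allDigitsA]
          · simp only [hr, if_false]
            by_cases hd : allDigitsA r = true <;> simp [hd]
        · rw [show stepB 5 c = 8 from by simp [stepB, hdash, hdig], foldl8]
          have hdf : PySem.Chars.isdigit c = false := by rw [← Bool.not_eq_true]; exact hdig
          simp [isIntA, hdash, allDigits_cons, hdf]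

-- ---- characterisation of split('e') ----
def consH (p : List Char) : List (List Char) → List (List Char)
  | [] => [p]
  | x :: xs => (p ++ x) :: xs

def splitE : List Char → List (List Char)
  | [] => [[]]
  | c :: r => if c = 'e' then [] :: splitE r else consH [c] (splitE r)

theorem consH_ne_nil (p : List Char) (xs : List (List Char)) : consH p xs ≠ [] := by
  cases xs <;> simp [consH]

theorem splitE_ne_nil (l : List Char) : splitE l ≠ [] := by
  cases l with
  | nil => simp [splitE]
  | cons c r =>
      simp only [splitE]; split
      · simp
      · exact consH_ne_nil _ _

theorem consH_consH (p q : List Char) (xs : List (List Char)) :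
    consH p (consH q xs) = consH (p ++ q) xs := by
  cases xs <;> simp [consH]

theorem consH_nil (xs : List (List Char)) (h : xs ≠ []) : consH [] xs = xs := by
  cases xs with
  | nil => exact absurd rfl h
  | cons x rest => simp [consH]

theorem go_eq (l : List Char) : ∀ (fuel : Nat) (cur : List Char) (acc : List (List Char)),
    l.length < fuel →
    PySem.Chars.splitOn.go ['e'] fuel l cur acc = acc.reverse ++ consH cur.reverse (splitE l) := by
  induction l with
  | nil =>
      intro fuel cur acc h
      obtain ⟨m, rfl⟩ : ∃ m, fuel = m + 1 := ⟨fuel - 1, by omega⟩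
      simp [PySem.Chars.splitOn.go, splitE, consH]
  | cons c rest ih =>
      intro fuel cur acc h
      obtain ⟨m, rfl⟩ : ∃ m, fuel = m + 1 := ⟨fuel - 1, by omega⟩
      rw [PySem.Chars.splitOn.go]
      simp only [List.isPrefixOf, List.length_cons] at *
      by_cases hc : c = 'e'
      · subst hc
        simp only [beq_self_eq_true, Bool.and_eq_true] at *
        rw [if_pos (by simp)]
        rw [show List.drop (([] : List Char).length + 1) ('e' :: rest) = rest by simp]
        rw [ih m [] (cur.reverse :: acc) (by omega)]
        rw [show ([] : List Char).reverse = [] from rfl, consH_nil _ (splitE_ne_nil rest)]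
        cases h2 : splitE rest with
        | nil => exact absurd h2 (splitE_ne_nil rest)
        | cons x xs => simp [splitE, consH, h2]
      · rw [if_neg (by simp [Ne.symm hc])]
        rw [ih m (c :: cur) acc (by omega)]
        simp only [splitE, if_neg hc, List.reverse_cons]
        rw [consH_consH]

theorem splitOn_eq (L : List Char) : PySem.Chars.splitOn L ['e'] = splitE L := by
  unfold PySem.Chars.splitOn
  rw [go_eq L (L.length + 1) [] [] (by omega)]
  rw [show ([] : List Char).reverse = [] from rfl,
      show ([] : List (List Char)).reverse = [] from rfl,
      consH_nil _ (splitE_ne_nil L), List.nil_append]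

theorem splitE_no_e (l : List Char) (h : 'e' ∉ l) : splitE l = [l] := by
  induction l with
  | nil => rfl
  | cons c r ih =>
      have hc : c ≠ 'e' := fun hh => h (hh ▸ List.mem_cons_self)
      rw [splitE, if_neg hc, ih (fun hh => h (List.mem_cons_of_mem _ hh))]
      rfl

theorem splitE_append (u v : List Char) (h : 'e' ∉ u) :
    splitE (u ++ 'e' :: v) = u :: splitE v := by
  induction u with
  | nil => simp [splitE]
  | cons c u' ih =>
      have hc : c ≠ 'e' := fun hh => h (hh ▸ List.mem_cons_self)
      rw [List.cons_append, splitE, if_neg hc, ih (fun hh => h (List.mem_cons_of_mem _ hh))]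
      rfl

theorem splitE_two_le (v : List Char) (h : 'e' ∈ v) : 2 ≤ (splitE v).length := by
  induction v with
  | nil => exact absurd h (List.not_mem_nil)
  | cons c r ih =>
      by_cases hc : c = 'e'
      · subst hc
        rw [splitE, if_pos rfl]
        have := splitE_ne_nil r
        cases h2 : splitE r with
        | nil => exact absurd h2 this
        | cons x xs => simp
      · have hr : 'e' ∈ r := by
          rcases List.mem_cons.mp h with rfl | hr
          · exact absurd rfl hc
          · exact hr
        rw [splitE, if_neg hc]
        have := ih hr
        cases h2 : splitE r with
        | nil => exact absurd h2 (splitE_ne_nil r)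
        | cons x xs =>
            rw [h2] at this
            simp only [consH, List.length_cons] at *
            omega

theorem first_e (L : List Char) (h : 'e' ∈ L) : ∃ u v, L = u ++ 'e' :: v ∧ 'e' ∉ u := by
  induction L with
  | nil => exact absurd h (List.not_mem_nil)
  | cons c r ih =>
      by_cases hc : c = 'e'
      · exact ⟨[], r, by rw [hc]; rfl, List.not_mem_nil⟩
      · have hr : 'e' ∈ r := by
          rcases List.mem_cons.mp h with rfl | hr
          · exact absurd rfl hc
          · exact hr
        obtain ⟨u, v, rfl, hu⟩ := ih hr
        exact ⟨c :: u, v, rfl, by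
          intro hm
          rcases List.mem_cons.mp hm with rfl | hm
          · exact hc rfl
          · exact hu hm⟩

-- ---- lowering facts ----
theorem lowerChar_fix (c : Char) (h : PySem.Chars.isupper c = false) : PySem.Chars.lowerChar c = c := by
  simp [PySem.Chars.lowerChar, h]

theorem lowerChar_idem (c : Char) :
    PySem.Chars.lowerChar (PySem.Chars.lowerChar c) = PySem.Chars.lowerChar c := by
  by_cases hu : PySem.Chars.isupper c = true
  · have hb := upper_bounds c hu
    have hln := toNat_lower_of_upper c hu
    have hlow : PySem.Chars.isupper (PySem.Chars.lowerChar c) = false := by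
      rw [← Bool.not_eq_true]
      intro h2
      have := upper_bounds _ h2
      omega
    exact lowerChar_fix _ hlow
  · rw [Bool.not_eq_true] at hu
    rw [lowerChar_fix c hu, lowerChar_fix c hu]

theorem lower_fix_of_mem (c : Char) (l : List Char) (h : c ∈ PySem.Chars.lower l) :
    PySem.Chars.lowerChar c = c := by
  unfold PySem.Chars.lower at h
  obtain ⟨c0, _, rfl⟩ := List.mem_map.mp h
  exact lowerChar_idem c0

theorem E_not_mem_lower (l : List Char) : 'E' ∉ PySem.Chars.lower l := by
  intro h
  have := lower_fix_of_mem 'E' l h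
  exact absurd this (by decide)

theorem lower_eq_self_of_subset (u : List Char) (hfix : ∀ c ∈ u, PySem.Chars.lowerChar c = c) :
    PySem.Chars.lower u = u := by
  unfold PySem.Chars.lower
  rw [List.map_congr_left hfix]
  exact List.map_id' u

theorem not_mem_of_e_not_mem_lower (l : List Char) (h : 'e' ∉ PySem.Chars.lower l) :
    'e' ∉ l ∧ 'E' ∉ l := by
  constructor <;> intro hm <;> apply h
  · have := List.mem_map_of_mem (f := PySem.Chars.lowerChar) hm
    rwa [show PySem.Chars.lowerChar 'e' = 'e' from by decide] at this
  · have := List.mem_map_of_mem (f := PySem.Chars.lowerChar) hm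
    rwa [show PySem.Chars.lowerChar 'E' = 'e' from by decide] at this

theorem isIn_e_iff (L : List Char) : PySem.Chars.isIn ['e'] L = true ↔ 'e' ∈ L := by
  rw [PySem.Chars.isIn_iff_infix, List.singleton_infix_iff]

-- ---- token-level equivalence ----
theorem allDigits_e_false (l : List Char) (h : 'e' ∈ l) : allDigitsA l = false := by
  induction l with
  | nil => exact absurd h (List.not_mem_nil)
  | cons c r ih =>
      rw [allDigits_cons]
      by_cases hc : c = 'e'
      · subst hc; rw [show PySem.Chars.isdigit 'e' = false from by decide]; simp
      · have hr : 'e' ∈ r := by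
          rcases List.mem_cons.mp h with rfl | hr
          · exact absurd rfl hc
          · exact hr
        rw [ih hr]
        cases PySem.Chars.isdigit c <;> simp

theorem isIntA_e_false (v : List Char) (h : 'e' ∈ v) : isIntA v = false := by
  cases v with
  | nil => exact absurd h (List.not_mem_nil)
  | cons c r =>
      by_cases hc : c = '-'
      · subst hc
        have hr : 'e' ∈ r := by
          rcases List.mem_cons.mp h with hh | hr
          · exact absurd hh (by decide)
          · exact hr
        cases r with
        | nil => exact absurd hr (List.not_mem_nil)
        | cons c2 r2 =>
            simp only [isIntA, if_pos rfl, show ¬(c2 :: r2 = []) from by simp, if_false]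
            exact allDigits_e_false _ hr
      · simp only [isIntA, hc, if_false]
        exact allDigits_e_false _ h

theorem okB_decomp (t u v : List Char) (hL : PySem.Chars.lower t = u ++ 'e' :: v)
    (hu : 'e' ∉ u) (hEu : 'E' ∉ u) :
    okB t = (aNoE u && isIntA v) := by
  have h := mant_corr u hu hEu
  unfold okB
  simp only []
  rw [← foldl_lower t 0, hL, List.foldl_append, List.foldl_cons]
  by_cases ha : aNoE u = true
  · have hf := h.1.mpr ha
    have h5 : stepB (u.foldl stepB 0) 'e' = 5 := by
      rcases hf with hf | hf <;> rw [hf] <;> decide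
    rw [h5, ha, Bool.true_and]
    exact exp_corr v
  · rw [Bool.not_eq_true] at ha
    have hne2 : u.foldl stepB 0 ≠ 2 := fun hf => by
      have := h.1.mp (Or.inl hf); rw [ha] at this; exact Bool.false_ne_true this
    have hne3 : u.foldl stepB 0 ≠ 3 := fun hf => by
      have := h.1.mp (Or.inr hf); rw [ha] at this; exact Bool.false_ne_true this
    have h8 : stepB (u.foldl stepB 0) 'e' = 8 := by
      have hmem := h.2
      simp only [List.mem_cons, List.not_mem_nil, or_false] at hmem
      rcases hmem with hf | hf | hf | hf | hf | hf <;>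
        first
        | (exact absurd hf hne2)
        | (exact absurd hf hne3)
        | (rw [hf]; decide)
    rw [h8, foldl8, ha, Bool.false_and]
    decide

theorem isFloatA_succ (fuel : Nat) (l : List Char) :
    isFloatA (fuel + 1) l =
      (if l = [] then false
      else if PySem.Chars.isIn ['e'] (PySem.Chars.lower l) then
        match PySem.Chars.splitOn (PySem.Chars.lower l) ['e'] with
        | [mantissa, exponent] =>
            if mantissa = [] then false
            else if exponent = [] then false
            else if !isFloatA fuel mantissa then false
            else if !isIntA exponent then false
            else true
        | _ => false
      else
        match l with
        | [] => false
        | c :: rest =>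
            if (['+','-'].contains c) then
              (if rest = [] then false else floatLoopA false false rest)
            else floatLoopA false false (c :: rest)) := rfl

theorem isFloatA_noE (m : Nat) (u : List Char) (hu : u ≠ [])
    (he : 'e' ∉ PySem.Chars.lower u) : isFloatA (m + 1) u = aNoE u := by
  rw [isFloatA_succ, if_neg hu, if_neg (fun hh => he ((isIn_e_iff _).mp hh))]
  cases u with
  | nil => exact absurd rfl hu
  | cons c rest => rfl

theorem tok_eq (t : List Char) : isFloatA (t.length + 1) t = okB t := by
  by_cases ht : t = []
  · subst ht; decide
  obtain ⟨m, hm⟩ : ∃ m, t.length = m + 1 := by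
    cases t with
    | nil => exact absurd rfl ht
    | cons c r => exact ⟨r.length, rfl⟩
  by_cases he : 'e' ∈ PySem.Chars.lower t
  · -- 'e' (or 'E') occurs in the token
    obtain ⟨u, v, hL, hu⟩ := first_e _ he
    have hEu : 'E' ∉ u := fun hh => E_not_mem_lower t (hL ▸ List.mem_append_left _ hh)
    have hufix : ∀ c ∈ u, PySem.Chars.lowerChar c = c := fun c hc =>
      lower_fix_of_mem c t (hL ▸ List.mem_append_left _ hc)
    rw [hm, isFloatA_succ, if_neg ht, if_pos ((isIn_e_iff _).mpr he), splitOn_eq, hL,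
        splitE_append u v hu, okB_decomp t u v hL hu hEu]
    by_cases hev : 'e' ∈ v
    · -- more than one 'e': A rejects via the parts-length check, B because the
      -- exponent part cannot be an integer
      have h2 := splitE_two_le v hev
      rw [isIntA_e_false v hev, Bool.and_false]
      cases h3 : splitE v with
      | nil => exact absurd h3 (splitE_ne_nil v)
      | cons x xs =>
          cases xs with
          | nil => rw [h3] at h2; simp at h2
          | cons y zs => rfl
    · rw [splitE_no_e v hev]
      show (if u = [] then false
            else if v = [] then false
            else if (!isFloatA (m + 1) u) = true then false
            else if (!isIntA v) = true then false
            else true) = (aNoE u && isIntA v)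
      by_cases hu0 : u = []
      · rw [if_pos hu0, hu0]
        simp [aNoE]
      · rw [if_neg hu0]
        have hlu : PySem.Chars.lower u = u := lower_eq_self_of_subset u hufix
        rw [isFloatA_noE m u hu0 (by rw [hlu]; exact hu)]
        by_cases hv0 : v = []
        · subst hv0
          rw [if_pos rfl]
          simp [isIntA]
        · rw [if_neg hv0]
          by_cases ha : aNoE u = true
          · rw [ha]
            simp only [Bool.not_true, Bool.false_eq_true, if_false, Bool.true_and]
            by_cases hi : isIntA v = true
            · rw [hi]; simp
            · rw [Bool.not_eq_true] at hi; rw [hi]; simp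
          · rw [Bool.not_eq_true] at ha
            rw [ha]
            simp
  · -- no 'e' and no 'E' in the token
    obtain ⟨het, hEt⟩ := not_mem_of_e_not_mem_lower t he
    have h := mant_corr t het hEt
    rw [isFloatA_noE t.length t ht he]
    unfold okB
    simp only []
    by_cases ha : aNoE t = true
    · rw [ha]
      rcases h.1.mpr ha with hf | hf <;> rw [hf] <;> decide
    · rw [Bool.not_eq_true] at ha
      rw [ha]
      have hne2 : t.foldl stepB 0 ≠ 2 := fun hf => by
        have := h.1.mp (Or.inl hf); rw [ha] at this; exact Bool.false_ne_true this
      have hne3 : t.foldl stepB 0 ≠ 3 := fun hf => by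
        have := h.1.mp (Or.inr hf); rw [ha] at this; exact Bool.false_ne_true this
      have hne7 : t.foldl stepB 0 ≠ 7 := by
        have hmem := h.2
        simp only [List.mem_cons, List.not_mem_nil, or_false] at hmem
        omega
      simp [hne2, hne3, hne7]

-- ---- lifting to the whole string ----
theorem partsLoop_all (ps : List String) :
    partsLoopA ps = ps.all (fun p => okB p.toList) := by
  induction ps with
  | nil => rfl
  | cons p r ih =>
      rw [partsLoopA, tok_eq]
      cases h : okB p.toList
      · simp [h]
      · simp [h, ih]

-- ===== VERDICT (by name: the statement is the Claim_ definition above) =====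
theorem string_is_float_list_spec : Claim_equal_string_is_float_list := by
  intro s n _
  unfold Spec_string_is_float_list string_is_float_list string_is_float_list_alt
  simp only []
  rw [partsLoop_all]
  by_cases h : ((PySem.Str.split₀ s).length : Int) = n
  · rw [if_neg (by omega : ¬((PySem.Str.split₀ s).length : Int) ≠ n),
        if_neg (by omega : ¬n ≠ ((PySem.Str.split₀ s).length : Int))]
  · rw [if_pos (by omega : ((PySem.Str.split₀ s).length : Int) ≠ n),
        if_pos (by omega : n ≠ ((PySem.Str.split₀ s).length : Int))]
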